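-- pv_equiv track=rewrite | github.com/bigov/daft-lib | Python/src-archiv/myApp/tricks.py | expand_IxI
-- ===== SOURCE A (Python) =====
-- def expand_IxI(descr_list, I):
--     """ Декодирует список, описывающий в сжатой форме поверхность одной
--         плитки в квадратную матрицу координат IxI (9х9)
--
--         Если начало поверхности должно состоит из пропусков (нулей), тогда в
--         декодируемом списке ведущим должен быть 0:
--             m[0, 3, 5] - вначале будет 3 пропуска (нуля)
--         Матрица из всех (81) нулей кодируется как m[0] или m[0,81], хотя
--             такая поверхность не имеет смысла - ее нет.
--
--         Матрица из 81-й единицы кодируется как m[] или m[81]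
--         В остальных позициях, кроме начальной, нулей быть не должно.
--     """
--
--     f = 1
--     if descr_list:
--         descr_list.reverse()
--         Dp = descr_list.pop()
--         if Dp == 0:
--             f = 0
--             Dp = descr_list.pop() if descr_list else 0
--     else:
--         Dp = 0
--
--     IxI = []
--     m_row = []
--     for l in range(I):
--         for c in range(I):
--             m_row.append(f)
--             if Dp:
--                 Dp -= 1
--                 if not Dp:
--                     f = 0 if f == 1 else 1
--                     Dp = descr_list.pop() if descr_list else 0
--         IxI.append(m_row)
--         m_row = []
--     del(f, c, l, m_row, Dp)
--     return IxI
-- ===== SOURCE B (Python) =====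
-- def expand_IxI(descr_list, I):
--     """Run-based decode: emit whole runs into a flat list, then cut into I rows.
--     (Unlike A, does not mutate descr_list; equivalence is about the return value.)"""
--     total = I * I
--     f = 1
--     idx = 0
--     if descr_list and descr_list[0] == 0:
--         f = 0
--         idx = 1
--     out = []
--     while len(out) < total:
--         d = descr_list[idx] if idx < len(descr_list) else 0
--         idx += 1
--         rem = total - len(out)
--         if 0 < d < rem:
--             out.extend([f] * d)
--             f = 1 - f
--         else:
--             out.extend([f] * rem)
--     return [out[r * I:(r + 1) * I] for r in range(I)]
-- ===== Notes on version B (the rewrite author's own statement) =====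
-- stated objective: alternative
-- what changed: B replaces A's per-cell nested loops (append one flag per cell, decrement the current run, toggle/pop when it hits zero) with a run-at-a-time decode: it emits min(run, remaining) copies of the flag into one flat list per run and then slices the flat list into I rows; B also does not mutate descr_list (A reverses and pops it in place).
-- outside the precondition, e.g. on expand_IxI([3], 0): A raises UnboundLocalError, B returns []
import Mathlib
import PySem

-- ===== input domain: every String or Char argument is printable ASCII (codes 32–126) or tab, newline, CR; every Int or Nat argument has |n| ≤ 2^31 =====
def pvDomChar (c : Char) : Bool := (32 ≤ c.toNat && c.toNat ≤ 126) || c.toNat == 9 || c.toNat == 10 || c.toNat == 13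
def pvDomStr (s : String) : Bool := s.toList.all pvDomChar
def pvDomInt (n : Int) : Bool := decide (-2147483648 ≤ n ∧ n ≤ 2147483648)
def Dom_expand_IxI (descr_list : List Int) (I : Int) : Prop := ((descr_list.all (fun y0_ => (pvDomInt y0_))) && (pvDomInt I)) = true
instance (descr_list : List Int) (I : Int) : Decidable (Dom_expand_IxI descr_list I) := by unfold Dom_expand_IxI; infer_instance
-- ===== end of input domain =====

-- B decodes whole runs at a time into a flat list and then cuts it into rows, instead of
-- A's per-cell nested loops; equivalence is about the return value (A mutates descr_list, B does not).

-- ===== PORT A =====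
-- `descr_list.pop() if descr_list else 0` on a Python list used as a stack
def popOr0 (xs : List Int) : Int × List Int :=
  match PySem.List.pop? xs with
  | some r => r
  | none => (0, xs)

-- A's initialisation: f = 1; reverse; Dp = pop(); leading 0 → f = 0 and pop again
def initA (descr_list : List Int) : Int × Int × List Int :=
  if descr_list ≠ [] then
    let pr := popOr0 descr_list.reverse
    if pr.1 = 0 then
      let pr2 := popOr0 pr.2
      (0, pr2.1, pr2.2)
    else (1, pr.1, pr.2)
  else (1, 0, [])

-- body of `for c in range(I)`: state ((f, Dp, stack), m_row)
def cellA (p : (Int × Int × List Int) × List Int) (_c : Int) : (Int × Int × List Int) × List Int :=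
  let f := p.1.1
  let Dp := p.1.2.1
  let rev := p.1.2.2
  let row := p.2 ++ [f]
  if Dp ≠ 0 then
    let Dp := Dp - 1
    if Dp = 0 then
      let f := if f = 1 then 0 else 1
      let pr := popOr0 rev
      ((f, pr.1, pr.2), row)
    else ((f, Dp, rev), row)
  else ((f, Dp, rev), row)

-- body of `for l in range(I)`: state ((f, Dp, stack), IxI)
def rowA (I : Int) (q : (Int × Int × List Int) × List (List Int)) (_l : Int) :
    (Int × Int × List Int) × List (List Int) :=
  let r := (PySem.List.pyRange 0 I 1).foldl cellA (q.1, [])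
  (r.1, q.2 ++ [r.2])

def expand_IxI (descr_list : List Int) (I : Int) : List (List Int) :=
  ((PySem.List.pyRange 0 I 1).foldl (rowA I) (initA descr_list, [])).2

-- ===== PORT B =====
-- B's while-loop: emit min(run, remaining) copies of f per step; recursion on remaining cells
def emitRuns : Nat → Int → List Int → List Int
  | 0, _, _ => []
  | rem+1, f, runs =>
    let d := runs.headD 0
    if h : 0 < d ∧ d < (rem+1 : Int) then
      List.replicate d.toNat f ++ emitRuns (rem+1 - d.toNat) (1 - f) runs.tail
    else
      List.replicate (rem+1) f
termination_by rem _ _ => rem + 1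
decreasing_by omega

-- B's initialisation: leading 0 → start with f = 0 and skip it
def initB (descr_list : List Int) : Int × List Int :=
  if descr_list.head? = some 0 then (0, descr_list.tail) else (1, descr_list)

def expand_IxI_alt (descr_list : List Int) (I : Int) : List (List Int) :=
  let fr := initB descr_list
  let out := emitRuns (I * I).toNat fr.1 fr.2
  (PySem.List.pyRange 0 I 1).map
    (fun r => PySem.List.slice out (some (r * I)) (some ((r + 1) * I)))

-- ===== PRECONDITION & SPEC =====
-- A's trailing `del(f, c, l, …)` raises UnboundLocalError whenever the loops never run, i.e. I ≤ 0.
def Pre_expand_IxI (_descr_list : List Int) (I : Int) : Prop := 1 ≤ I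
instance (descr_list : List Int) (I : Int) : Decidable (Pre_expand_IxI descr_list I) := by
  unfold Pre_expand_IxI; infer_instance

def pvWitness_expand_IxI : List Int × Int := ([0, 3, 2], 3)

def Spec_expand_IxI (descr_list : List Int) (I : Int) (out : List (List Int)) : Prop := out = expand_IxI_alt descr_list I
instance (descr_list : List Int) (I : Int) (out : List (List Int)) : Decidable (Spec_expand_IxI descr_list I out) := by unfold Spec_expand_IxI; infer_instance

-- ===== CLAIM (what is proved, stated in full; the proofs are below) =====
def Claim_equal_expand_IxI : Prop := ∀ (descr_list : List Int) (I : Int), Dom_expand_IxI descr_list I → Pre_expand_IxI descr_list I → Spec_expand_IxI descr_list I (expand_IxI descr_list I)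

-- ===== LEMMAS AND PROOFS =====

-- iterate the cell step k times (the cell step ignores its range index)
def iterC : Nat → ((Int × Int × List Int) × List Int) → ((Int × Int × List Int) × List Int)
  | 0, p => p
  | k+1, p => iterC k (cellA p 0)

def stA (k : Nat) (st : Int × Int × List Int) : Int × Int × List Int := (iterC k (st, [])).1
def flatA (k : Nat) (st : Int × Int × List Int) : List Int := (iterC k (st, [])).2

lemma cellA_ignores (p : (Int × Int × List Int) × List Int) (c : Int) : cellA p c = cellA p 0 := rfl

lemma foldl_cellA (l : List Int) (p : (Int × Int × List Int) × List Int) :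
    l.foldl cellA p = iterC l.length p := by
  induction l generalizing p with
  | nil => rfl
  | cons x t ih => simp [List.foldl, iterC, cellA_ignores _ x, ih]

lemma cellA_row (st : Int × Int × List Int) (row : List Int) :
    cellA (st, row) 0 = ((cellA (st, []) 0).1, row ++ (cellA (st, []) 0).2) := by
  obtain ⟨f, Dp, rev⟩ := st
  simp only [cellA]
  split_ifs <;> simp

lemma iterC_row (k : Nat) (st : Int × Int × List Int) (row : List Int) :
    iterC k (st, row) = (stA k st, row ++ flatA k st) := by
  induction k generalizing st row with
  | zero => simp [iterC, stA, flatA]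
  | succ k ih =>
    show iterC k (cellA (st, row) 0) = _
    rw [cellA_row]
    rw [ih]
    have h2 : iterC k (cellA (st, ([] : List Int)) 0) =
        (stA k (cellA (st, []) 0).1, (cellA (st, []) 0).2 ++ flatA k (cellA (st, []) 0).1) := by
      conv_lhs => rw [← Prod.mk.eta (p := cellA (st, ([] : List Int)) 0)]
      exact ih _ _
    show _ = ((iterC k (cellA (st, ([] : List Int)) 0)).1, row ++ (iterC k (cellA (st, ([] : List Int)) 0)).2)
    rw [h2]
    simp

lemma iterC_add (a b : Nat) (p : (Int × Int × List Int) × List Int) :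
    iterC (a + b) p = iterC b (iterC a p) := by
  induction a generalizing p with
  | zero => rw [Nat.zero_add]; rfl
  | succ a ih =>
    have : a + 1 + b = (a + b) + 1 := by omega
    rw [this]
    show iterC (a+b) (cellA p 0) = _
    rw [ih]
    rfl

lemma flatA_add (a b : Nat) (st : Int × Int × List Int) :
    flatA (a + b) st = flatA a st ++ flatA b (stA a st) ∧ stA (a + b) st = stA b (stA a st) := by
  have h := iterC_add a b (st, [])
  rw [iterC_row a st []] at h
  simp only [List.nil_append] at h
  rw [iterC_row b (stA a st) (flatA a st)] at h
  unfold flatA stA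
  rw [h]
  exact ⟨rfl, rfl⟩

lemma length_cellA_row (st : Int × Int × List Int) : (cellA (st, []) 0).2 = [st.1] := by
  obtain ⟨f, Dp, rev⟩ := st
  simp only [cellA]
  split_ifs <;> rfl

lemma length_flatA (k : Nat) (st : Int × Int × List Int) : (flatA k st).length = k := by
  induction k generalizing st with
  | zero => rfl
  | succ k ih =>
    have h0 : flatA (k+1) st = (cellA (st, []) 0).2 ++ flatA k (cellA (st, []) 0).1 := by
      unfold flatA
      show (iterC k (cellA (st, ([] : List Int)) 0)).2 = _
      conv_lhs => rw [← Prod.mk.eta (p := cellA (st, ([] : List Int)) 0)]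
      rw [iterC_row]
      rfl
    rw [h0, length_cellA_row]
    simp [ih]

lemma popOr0_reverse (rs : List Int) : popOr0 rs.reverse = (rs.headD 0, rs.tail.reverse) := by
  cases rs with
  | nil => rfl
  | cons h t =>
    simp only [popOr0, List.reverse_cons, PySem.List.pop?_last]
    rfl

-- a whole positive run: Dp cells emit f, then toggle and pop
lemma iterC_run (j : Nat) : ∀ (f Dp : Int) (rev row : List Int), 0 < Dp → Dp.toNat = j + 1 →
    iterC (j+1) ((f, Dp, rev), row) =
      (((if f = 1 then 0 else 1), (popOr0 rev).1, (popOr0 rev).2), row ++ List.replicate (j+1) f) := by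
  induction j with
  | zero =>
    intro f Dp rev row hpos hj
    have : Dp = 1 := by omega
    subst this
    show iterC 0 (cellA ((f, 1, rev), row) 0) = _
    simp [iterC, cellA]
  | succ j ih =>
    intro f Dp rev row hpos hj
    show iterC (j+1) (cellA ((f, Dp, rev), row) 0) = _
    have h1 : cellA ((f, Dp, rev), row) 0 = ((f, Dp - 1, rev), row ++ [f]) := by
      simp only [cellA]
      have hne : ¬ Dp = 0 := by omega
      have hne1 : ¬ Dp - 1 = 0 := by omega
      simp [hne, hne1]
    rw [h1, ih f (Dp - 1) rev (row ++ [f]) (by omega) (by omega)]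
    simp [List.replicate_succ]

-- Dp = 0: every remaining cell emits f, state frozen
lemma iterC_stall (k : Nat) : ∀ (f : Int) (rev row : List Int),
    iterC k ((f, 0, rev), row) = ((f, 0, rev), row ++ List.replicate k f) := by
  induction k with
  | zero => intro f rev row; simp [iterC]
  | succ k ih =>
    intro f rev row
    show iterC k (cellA ((f, 0, rev), row) 0) = _
    have h1 : cellA ((f, 0, rev), row) 0 = ((f, 0, rev), row ++ [f]) := by
      simp [cellA]
    rw [h1, ih]
    simp [List.replicate_succ]

-- Dp < 0: decrements forever, every cell emits f
lemma iterC_neg (k : Nat) : ∀ (f Dp : Int) (rev row : List Int), Dp < 0 →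
    iterC k ((f, Dp, rev), row) = ((f, Dp - k, rev), row ++ List.replicate k f) := by
  induction k with
  | zero => intro f Dp rev row _; simp [iterC]
  | succ k ih =>
    intro f Dp rev row hneg
    show iterC k (cellA ((f, Dp, rev), row) 0) = _
    have h1 : cellA ((f, Dp, rev), row) 0 = ((f, Dp - 1, rev), row ++ [f]) := by
      simp only [cellA]
      have hne : ¬ Dp = 0 := by omega
      have hne1 : ¬ Dp - 1 = 0 := by omega
      simp [hne, hne1]
    rw [h1, ih f (Dp - 1) rev (row ++ [f]) (by omega)]
    have hc : Dp - 1 - (k : Int) = Dp - ((k + 1 : Nat) : Int) := by push_cast; ring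
    rw [hc]
    simp [List.replicate_succ]

-- 0 < k < Dp: k cells emit f, run not finished
lemma iterC_partial (k : Nat) : ∀ (f Dp : Int) (rev row : List Int), 0 < Dp → k < Dp.toNat →
    iterC k ((f, Dp, rev), row) = ((f, Dp - k, rev), row ++ List.replicate k f) := by
  induction k with
  | zero => intro f Dp rev row _ _; simp [iterC]
  | succ k ih =>
    intro f Dp rev row hpos hk
    show iterC k (cellA ((f, Dp, rev), row) 0) = _
    have h1 : cellA ((f, Dp, rev), row) 0 = ((f, Dp - 1, rev), row ++ [f]) := by
      simp only [cellA]
      have hne : ¬ Dp = 0 := by omega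
      have hne1 : ¬ Dp - 1 = 0 := by omega
      simp [hne, hne1]
    rw [h1, ih f (Dp - 1) rev (row ++ [f]) (by omega) (by omega)]
    have hc : Dp - 1 - (k : Int) = Dp - ((k + 1 : Nat) : Int) := by push_cast; ring
    rw [hc]
    simp [List.replicate_succ]

-- B's emitter, phrased on the current run (for aligning with A's state)
def emitCur (n : Nat) (f Dp : Int) (rs : List Int) : List Int :=
  if 0 < Dp ∧ Dp.toNat < n then
    List.replicate Dp.toNat f ++ emitRuns (n - Dp.toNat) (1 - f) rs
  else
    List.replicate n f

lemma emitRuns_eq_emitCur (n : Nat) (f : Int) (rs : List Int) :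
    emitRuns n f rs = emitCur n f (rs.headD 0) rs.tail := by
  cases n with
  | zero =>
    simp only [emitRuns, emitCur]
    simp
  | succ m =>
    rw [emitRuns]
    simp only [emitCur]
    split_ifs with h1 h2 h3
    · rfl
    · exfalso; omega
    · exfalso; omega
    · rfl

-- MAIN: A's cell-by-cell emission from state (f, Dp, rs.reverse) is B's run-based emission
lemma flatA_eq_emitCur (n : Nat) : ∀ (f Dp : Int) (rs : List Int), (f = 0 ∨ f = 1) →
    flatA n (f, Dp, rs.reverse) = emitCur n f Dp rs := by
  induction n using Nat.strong_induction_on with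
  | _ n ih =>
    intro f Dp rs hf
    by_cases h : 0 < Dp ∧ Dp.toNat < n
    · -- the whole run fits strictly: Dp cells, toggle, pop, continue
      obtain ⟨hpos, hlt⟩ := h
      obtain ⟨j, hj⟩ : ∃ j, Dp.toNat = j + 1 := ⟨Dp.toNat - 1, by omega⟩
      have hsplit := flatA_add (j+1) (n - (j+1)) (f, Dp, rs.reverse)
      have hn : (j + 1) + (n - (j+1)) = n := by omega
      rw [hn] at hsplit
      have hrun := iterC_run j f Dp rs.reverse [] hpos hj
      have hst : stA (j+1) (f, Dp, rs.reverse) =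
          ((if f = 1 then 0 else 1), rs.headD 0, rs.tail.reverse) := by
        unfold stA; rw [hrun, popOr0_reverse]
      have hflat1 : flatA (j+1) (f, Dp, rs.reverse) = List.replicate (j+1) f := by
        unfold flatA; rw [hrun]; simp
      have htog : (if f = 1 then (0:Int) else 1) = 1 - f := by
        rcases hf with h | h <;> subst h <;> norm_num
      rw [hsplit.1, hflat1, hst, htog]
      have hrec := ih (n - (j+1)) (by omega) (1 - f) (rs.headD 0) rs.tail
        (by rcases hf with h | h <;> subst h <;> norm_num)
      rw [hrec, ← emitRuns_eq_emitCur]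
      unfold emitCur
      rw [if_pos ⟨hpos, hlt⟩, hj]
    · -- run does not finish strictly inside: all n cells emit f
      have hend : flatA n (f, Dp, rs.reverse) = List.replicate n f := by
        rcases lt_trichotomy Dp 0 with hneg | hz | hpos
        · unfold flatA; rw [iterC_neg n f Dp rs.reverse [] hneg]; simp
        · subst hz; unfold flatA; rw [iterC_stall n f rs.reverse []]; simp
        · have hge : n ≤ Dp.toNat := by omega
          rcases Nat.lt_or_ge n Dp.toNat with hlt2 | hge2
          · rcases Nat.eq_zero_or_pos n with h0 | hpos'
            · subst h0; rfl
            · unfold flatA; rw [iterC_partial n f Dp rs.reverse [] hpos hlt2]; simp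
          · have heq : n = Dp.toNat := by omega
            obtain ⟨j, hj⟩ : ∃ j, Dp.toNat = j + 1 := ⟨Dp.toNat - 1, by omega⟩
            unfold flatA
            rw [heq, hj, iterC_run j f Dp rs.reverse [] hpos hj]
            simp
      rw [hend]
      simp [emitCur, h]

-- initialisation: A's state corresponds to B's (flag, remaining runs)
lemma popOr0_append (x : Int) (t : List Int) : popOr0 (t ++ [x]) = (x, t) := by
  simp [popOr0, PySem.List.pop?_last]

lemma init_corr (descr_list : List Int) (N : Nat) :
    flatA N (initA descr_list) = emitRuns N (initB descr_list).1 (initB descr_list).2 := by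
  cases descr_list with
  | nil =>
    have hA : initA [] = (1, 0, ([] : List Int)) := rfl
    have hB : initB [] = (1, ([] : List Int)) := rfl
    rw [hA, hB]
    have := flatA_eq_emitCur N 1 0 [] (Or.inr rfl)
    simp only [List.reverse_nil] at this
    rw [this, emitRuns_eq_emitCur]
    rfl
  | cons d rest =>
    by_cases hd : d = 0
    · subst hd
      have hA : initA (0 :: rest) = (0, rest.headD 0, rest.tail.reverse) := by
        simp [initA, List.reverse_cons, popOr0_append, popOr0_reverse]
      have hB : initB (0 :: rest) = (0, rest) := by simp [initB]
      rw [hA, hB]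
      have := flatA_eq_emitCur N 0 (rest.headD 0) rest.tail (Or.inl rfl)
      rw [this, emitRuns_eq_emitCur]
    · have hA : initA (d :: rest) = (1, d, rest.reverse) := by
        simp only [initA, List.reverse_cons, popOr0_append, ne_eq, reduceCtorEq,
          not_false_eq_true, if_true]
        rw [if_neg hd]
      have hB : initB (d :: rest) = (1, d :: rest) := by simp [initB, hd]
      rw [hA, hB]
      have := flatA_eq_emitCur N 1 d rest (Or.inr rfl)
      rw [this, emitRuns_eq_emitCur]
      rfl

-- iterate the row step
def iterR (I : Int) : Nat → ((Int × Int × List Int) × List (List Int)) → ((Int × Int × List Int) × List (List Int))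
  | 0, q => q
  | k+1, q => iterR I k (rowA I q 0)

lemma foldl_rowA (I : Int) (l : List Int) (q : (Int × Int × List Int) × List (List Int)) :
    l.foldl (rowA I) q = iterR I l.length q := by
  induction l generalizing q with
  | nil => rfl
  | cons x t ih =>
    show t.foldl (rowA I) (rowA I q x) = _
    rw [ih]
    rfl

lemma rowA_eq (I : Int) (st : Int × Int × List Int) (IxI : List (List Int)) :
    rowA I (st, IxI) 0 = (stA I.toNat st, IxI ++ [flatA I.toNat st]) := by
  simp only [rowA, foldl_cellA]
  rw [show (PySem.List.pyRange 0 I 1).length = I.toNat by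
        rw [PySem.List.length_pyRange_one]; simp]
  rw [iterC_row]
  simp

lemma iterR_acc (I : Int) (k : Nat) : ∀ (st : Int × Int × List Int) (IxI : List (List Int)),
    iterR I k (st, IxI) = ((iterR I k (st, [])).1, IxI ++ (iterR I k (st, [])).2) := by
  induction k with
  | zero => intro st IxI; simp [iterR]
  | succ k ih =>
    intro st IxI
    show iterR I k (rowA I (st, IxI) 0) = _
    rw [rowA_eq]
    have hr : iterR I (k+1) (st, ([] : List (List Int))) = iterR I k (stA I.toNat st, [flatA I.toNat st]) := by
      show iterR I k (rowA I (st, []) 0) = _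
      rw [rowA_eq]
      simp
    rw [ih (stA I.toNat st) (IxI ++ [flatA I.toNat st]), hr, ih (stA I.toNat st) [flatA I.toNat st]]
    simp

-- A's matrix: row j is the flat emission of I cells from the state after j*I cells
lemma rowsA (I : Int) (k : Nat) : ∀ (st : Int × Int × List Int),
    (iterR I k (st, [])).2 = (List.range k).map (fun j => flatA I.toNat (stA (j * I.toNat) st)) := by
  induction k with
  | zero => intro st; simp [iterR]
  | succ k ih =>
    intro st
    show (iterR I k (rowA I (st, []) 0)).2 = _
    rw [rowA_eq, iterR_acc, ih (stA I.toNat st)]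
    rw [List.range_succ_eq_map]
    simp only [List.map_cons, List.map_map, List.nil_append, List.singleton_append]
    congr 1
    · simp [stA, iterC]
    · apply List.map_congr_left
      intro j _
      have h5 : stA (j * I.toNat) (stA I.toNat st) = stA (I.toNat + j * I.toNat) st :=
        (flatA_add I.toNat (j * I.toNat) st).2.symm
      have h6 : I.toNat + j * I.toNat = Nat.succ j * I.toNat := by
        rw [Nat.succ_mul]; omega
      simp only [Function.comp_apply, h5, h6]

-- slicing A's full flat emission recovers row j
lemma slice_flatA (n : Nat) (st : Int × Int × List Int) (j : Nat) (hj : j < n) :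
    ((flatA (n * n) st).drop (j * n)).take n = flatA n (stA (j * n) st) := by
  have hsplit1 := flatA_add (j * n) (n * n - j * n) st
  have h1 : j * n + (n * n - j * n) = n * n := by
    have : j * n ≤ n * n := Nat.mul_le_mul_right n (by omega)
    omega
  rw [h1] at hsplit1
  have hsplit2 := flatA_add n (n * n - j * n - n) (stA (j * n) st)
  have h2 : n + (n * n - j * n - n) = n * n - j * n := by
    have : (j + 1) * n ≤ n * n := Nat.mul_le_mul_right n (by omega)
    have : j * n + n ≤ n * n := by rw [← Nat.succ_mul]; exact this
    omega
  rw [h2] at hsplit2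
  rw [hsplit1.1, hsplit2.1]
  have h3 := List.drop_left (l₁ := flatA (j * n) st)
    (l₂ := flatA n (stA (j * n) st) ++ flatA (n * n - j * n - n) (stA n (stA (j * n) st)))
  rw [length_flatA] at h3
  rw [h3]
  have h4 := List.take_left (l₁ := flatA n (stA (j * n) st))
    (l₂ := flatA (n * n - j * n - n) (stA n (stA (j * n) st)))
  rw [length_flatA] at h4
  exact h4

lemma alt_eq (descr_list : List Int) (I : Int) :
    expand_IxI_alt descr_list I =
      (PySem.List.pyRange 0 I 1).map
        (fun r => PySem.List.slice (emitRuns (I * I).toNat (initB descr_list).1 (initB descr_list).2)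
          (some (r * I)) (some ((r + 1) * I))) := rfl

-- ===== VERDICT (by name: the statement is the Claim_ definition above) =====
theorem expand_IxI_spec : Claim_equal_expand_IxI := by
  intro descr_list I _hdom hpre
  unfold Spec_expand_IxI expand_IxI
  rw [alt_eq]
  have hI : (0:Int) < I := hpre
  set n := I.toNat with hn
  have hIn : I = (n : Int) := by omega
  -- A side: rows
  rw [foldl_rowA, show (PySem.List.pyRange 0 I 1).length = n by
        rw [PySem.List.length_pyRange_one]; omega]
  rw [rowsA]
  -- B side: map over the range, slices of the flat list
  have hNN : (I * I).toNat = n * n := by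
    rw [hIn]; exact_mod_cast Int.toNat_natCast (n * n)
  rw [← init_corr descr_list, hNN]
  rw [hIn, PySem.List.pyRange_one 0 (n : Int)]
  simp only [List.map_map, sub_zero, Int.toNat_natCast]
  apply List.map_congr_left
  intro j hj
  have hjn : j < n := List.mem_range.mp hj
  simp only [Function.comp_apply, zero_add]
  have hc1 : ((j : Int)) * (n : Int) = ((j * n : Nat) : Int) := by push_cast; ring
  have hc2 : ((j : Int) + 1) * (n : Int) = (((j + 1) * n : Nat) : Int) := by push_cast; ring
  rw [hc1, hc2, PySem.List.slice_natCast]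
  have harith : (j + 1) * n - j * n = n := by
    rw [Nat.succ_mul]; omega
  rw [harith]
  exact (slice_flatA n (initA descr_list) j hjn).symm
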